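-- pv_equiv track=rewrite | github.com/42maelstrom/Everything | Anything Py/src/Anything/Words.py | all_length_perms
-- ===== SOURCE A (Python) =====
-- def all_length_perms(length, min_sub = 2):
--     l = length
--     m = min_sub
--
--     perms = [[length]]
--     for sub in range(m, l - m + 1):
--         sub_perms = all_length_perms(l - sub, m)
--         for sp in sub_perms:
--             perms.append([sub] + sp)
--
--     return perms
-- ===== SOURCE B (Python) =====
-- def all_length_perms(length, min_sub=2):
--     # Bottom-up DP: build each sub-result once instead of recomputing it exponentially.
--     table = {}
--     for n in range(min_sub, length - min_sub + 1):
--         table[n] = [[n]] + [[s] + sp for s in range(min_sub, n - min_sub + 1)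
--                             for sp in table[n - s]]
--     return [[length]] + [[s] + sp for s in range(min_sub, length - min_sub + 1)
--                          for sp in table[length - s]]
-- ===== Notes on version B (the rewrite author's own statement) =====
-- stated objective: faster
-- what changed: Replaces A's naive recursion, which recomputes all_length_perms(l-sub) from scratch for every sub at every level, by a bottom-up dynamic program that fills a table of sub-results once and assembles the answer from cached entries.
import Mathlib
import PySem

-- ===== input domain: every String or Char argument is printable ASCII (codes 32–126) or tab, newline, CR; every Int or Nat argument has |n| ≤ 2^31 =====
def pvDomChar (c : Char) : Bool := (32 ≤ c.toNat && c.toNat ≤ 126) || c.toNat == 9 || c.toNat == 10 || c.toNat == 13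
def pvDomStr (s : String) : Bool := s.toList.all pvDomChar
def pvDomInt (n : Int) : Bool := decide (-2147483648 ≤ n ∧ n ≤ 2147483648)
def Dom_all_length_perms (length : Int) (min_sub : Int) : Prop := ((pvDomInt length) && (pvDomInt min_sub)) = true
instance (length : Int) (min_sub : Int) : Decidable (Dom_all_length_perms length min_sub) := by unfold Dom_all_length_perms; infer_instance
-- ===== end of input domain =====

-- B replaces A's exponentially recomputing recursion by a bottom-up memo table built once
-- (objective: faster). Return value only; neither version mutates its arguments.


-- ===== PORT A =====
-- fuel bounds the recursion depth only (each recursive call strictly decreases l when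
-- min_sub ≥ 1, so length.toNat + 1 is always enough inside Pre_); Python's RecursionError
-- case (min_sub ≤ 0) is excluded by Pre_ below.
def pvA_go : Nat → Int → Int → List (List Int)
  | 0, l, _ => [[l]]
  | fuel + 1, l, m =>
      (PySem.List.pyRange m (l - m + 1) 1).foldl
        (fun perms sub =>
          (pvA_go fuel (l - sub) m).foldl (fun perms sp => perms ++ [sub :: sp]) perms)
        [[l]]

def all_length_perms (length : Int) (min_sub : Int) : List (List Int) :=
  pvA_go (length.toNat + 1) length min_sub

-- ===== PORT B =====
-- one DP step: table[n] = [[n]] + [[s] + sp for s in range(m, n-m+1) for sp in table[n-s]]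
-- (Source B's table[n-s] is always present; .getD [] only totalises the lookup)
def pvB_step (m : Int) (t : PySem.Dict Int (List (List Int))) (n : Int) :
    PySem.Dict Int (List (List Int)) :=
  t.insert n ([[n]] ++ (PySem.List.pyRange m (n - m + 1) 1).flatMap
    (fun s => ((t.get? (n - s)).getD []).map (fun sp => s :: sp)))

def pvB_table (m b : Int) : PySem.Dict Int (List (List Int)) :=
  (PySem.List.pyRange m b 1).foldl (pvB_step m) PySem.Dict.empty

def all_length_perms_alt (length : Int) (min_sub : Int) : List (List Int) :=
  let table := pvB_table min_sub (length - min_sub + 1)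
  [[length]] ++ (PySem.List.pyRange min_sub (length - min_sub + 1) 1).flatMap
    (fun s => ((table.get? (length - s)).getD []).map (fun sp => s :: sp))

-- ===== PRECONDITION & SPEC =====
-- When min_sub ≤ 0 the Python A recurses on l - sub with sub ≤ 0, never terminating:
-- RecursionError. Pre_ excludes exactly those inputs.
def Pre_all_length_perms (length : Int) (min_sub : Int) : Prop := 1 ≤ min_sub
instance (length : Int) (min_sub : Int) : Decidable (Pre_all_length_perms length min_sub) := by unfold Pre_all_length_perms; infer_instance
def pvWitness_all_length_perms : Int × Int := (7, 2)

def Spec_all_length_perms (length : Int) (min_sub : Int) (out : List (List Int)) : Prop := out = all_length_perms_alt length min_sub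
instance (length : Int) (min_sub : Int) (out : List (List Int)) : Decidable (Spec_all_length_perms length min_sub out) := by unfold Spec_all_length_perms; infer_instance

-- ===== CLAIM (what is proved, stated in full; the proofs are below) =====
def Claim_equal_all_length_perms : Prop := ∀ (length : Int) (min_sub : Int), Dom_all_length_perms length min_sub → Pre_all_length_perms length min_sub → Spec_all_length_perms length min_sub (all_length_perms length min_sub)

-- ===== LEMMAS AND PROOFS =====

-- A's double append-loop is the flatMap of the prefixed sublists.
theorem pv_foldl_inner {β γ : Type} (g : List β) (h : β → γ) :
    ∀ acc : List γ, g.foldl (fun p b => p ++ [h b]) acc = acc ++ g.map h := by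
  induction g with
  | nil => simp
  | cons b bs ih => intro acc; simp [List.foldl, ih]

theorem pv_foldl_flatMap {α β γ : Type} (xs : List α) (g : α → List β) (h : α → β → γ) :
    ∀ init : List γ,
      xs.foldl (fun acc a => (g a).foldl (fun p b => p ++ [h a b]) acc) init
        = init ++ xs.flatMap (fun a => (g a).map (h a)) := by
  induction xs with
  | nil => simp
  | cons a as ih =>
      intro init
      rw [List.foldl_cons, ih, pv_foldl_inner, List.flatMap_cons, List.append_assoc]

-- fuel irrelevance: any fuel strictly above l.toNat computes the same value (for min_sub ≥ 1)
theorem pvA_go_fuel (m : Int) (hm : 1 ≤ m) :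
    ∀ (f : Nat), ∀ (g : Nat) (l : Int), l.toNat < f → l.toNat < g →
      pvA_go f l m = pvA_go g l m := by
  intro f
  induction f with
  | zero => intro g l hf _; omega
  | succ f ih =>
      intro g l hf hg
      cases g with
      | zero => omega
      | succ g =>
          simp only [pvA_go]
          apply PySem.List.foldl_congr_mem
          intro acc sub hsub
          rw [PySem.List.mem_pyRange_one] at hsub
          have hrec : pvA_go f (l - sub) m = pvA_go g (l - sub) m := by
            apply ih
            · omega
            · omega
          rw [hrec]

-- A's recurrence, stated on the top-level port
theorem pvA_recurrence (l m : Int) (hm : 1 ≤ m) :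
    all_length_perms l m
      = [[l]] ++ (PySem.List.pyRange m (l - m + 1) 1).flatMap
          (fun s => (all_length_perms (l - s) m).map (fun sp => s :: sp)) := by
  conv_lhs => rw [all_length_perms, pvA_go]
  rw [pv_foldl_flatMap]
  congr 1
  apply List.flatMap_congr
  intro s hs
  rw [PySem.List.mem_pyRange_one] at hs
  rw [pvA_go_fuel m hm l.toNat ((l - s).toNat + 1) (l - s) (by omega) (by omega),
    all_length_perms]

-- the memo table holds exactly A's values on the processed keys
theorem pvB_table_spec (m : Int) (hm : 1 ≤ m) :
    ∀ (d : Nat) (b : Int), (b - m).toNat = d →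
      ∀ k : Int, (pvB_table m b).get? k
        = if m ≤ k ∧ k < b then some (all_length_perms k m) else none := by
  intro d
  induction d with
  | zero =>
      intro b hb k
      have hble : b ≤ m := by omega
      unfold pvB_table
      rw [PySem.List.pyRange_one_eq_nil hble]
      simp only [List.foldl]
      rw [if_neg (by omega)]
      simp [PySem.Dict.empty, PySem.Dict.get?]
  | succ d ih =>
      intro b hb k
      have hmb : m ≤ b - 1 := by omega
      have hsplit : PySem.List.pyRange m b 1
          = PySem.List.pyRange m (b - 1) 1 ++ [b - 1] := by
        have := PySem.List.pyRange_one_succ_right (a := m) (b := b - 1) hmb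
        simpa using this
      unfold pvB_table
      rw [hsplit, List.foldl_append]
      have htbl : (PySem.List.pyRange m (b - 1) 1).foldl (pvB_step m) PySem.Dict.empty
          = pvB_table m (b - 1) := rfl
      rw [htbl]
      simp only [List.foldl]
      unfold pvB_step
      rw [PySem.Dict.get?_insert]
      by_cases hk : k = b - 1
      · subst hk
        rw [if_pos rfl, if_pos (by omega)]
        congr 1
        rw [pvA_recurrence (b - 1) m hm]
        congr 1
        apply List.flatMap_congr
        intro s hs
        rw [PySem.List.mem_pyRange_one] at hs
        rw [ih (b - 1) (by omega) (b - 1 - s)]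
        rw [if_pos (by constructor <;> omega)]
        rfl
      · rw [if_neg hk, ih (b - 1) (by omega) k]
        by_cases hkin : m ≤ k ∧ k < b - 1
        · rw [if_pos hkin, if_pos (by omega)]
        · rw [if_neg hkin, if_neg (by omega)]

-- ===== VERDICT (by name: the statement is the Claim_ definition above) =====
theorem all_length_perms_spec : Claim_equal_all_length_perms := by
  intro l m _ hm
  unfold Spec_all_length_perms all_length_perms_alt
  rw [pvA_recurrence l m hm]
  congr 1
  apply List.flatMap_congr
  intro s hs
  rw [PySem.List.mem_pyRange_one] at hs
  rw [pvB_table_spec m hm (l - m + 1 - m).toNat (l - m + 1) rfl (l - s)]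
  rw [if_pos (by constructor <;> omega)]
  rfl
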